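-- pv_equiv track=rewrite | github.com/Pendigard/deep-letter | src/word_searcher.py | get_highest_score_word
-- ===== SOURCE A (Python) =====
-- def get_highest_score_word(word, possible_words):
--     """
--     Fonction qui calule pour chaque mots possibles un scores et retourne les mots avec le score le plus élevé
--     @param word mot naïf prédit
--     @param possible_words liste de mots possibles
--     @return liste de mots avec le score le plus élevé
--     """
--     score = 0
--     scores = {}
--     for possible_word in possible_words:
--         for i in range(len(word)):
--             if word[i] == possible_word[i]:
--                 score += 1
--             if i > 0 and word[i-1] == word[i] and possible_word[i-1] == possible_word[i]:
--                 score += 1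
--         scores[possible_word] = score
--         score = 0
--     max_score = max(list(scores.values()))
--     words = [key for key in scores.keys() if scores[key] == max_score]
--     return words
-- ===== SOURCE B (Python) =====
-- def get_highest_score_word(word, possible_words):
--     best_score = None
--     best_words = []
--     seen = set()
--     for pw in possible_words:
--         if pw in seen:
--             continue
--         seen.add(pw)
--         s = sum((word[i] == pw[i])
--                 + (i > 0 and word[i-1] == word[i] and pw[i-1] == pw[i])
--                 for i in range(len(word)))
--         if best_score is None or s > best_score:
--             best_score = s
--             best_words = [pw]
--         elif s == best_score:
--             best_words.append(pw)
--     return best_words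
-- ===== Notes on version B (the rewrite author's own statement) =====
-- stated objective: simpler
-- what changed: B replaces A's score-dict plus separate max() and filter passes by a single pass that keeps a running best score and the list of best words (dedup via a seen set), with each word's score folded into one sum comprehension.
import Mathlib
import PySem

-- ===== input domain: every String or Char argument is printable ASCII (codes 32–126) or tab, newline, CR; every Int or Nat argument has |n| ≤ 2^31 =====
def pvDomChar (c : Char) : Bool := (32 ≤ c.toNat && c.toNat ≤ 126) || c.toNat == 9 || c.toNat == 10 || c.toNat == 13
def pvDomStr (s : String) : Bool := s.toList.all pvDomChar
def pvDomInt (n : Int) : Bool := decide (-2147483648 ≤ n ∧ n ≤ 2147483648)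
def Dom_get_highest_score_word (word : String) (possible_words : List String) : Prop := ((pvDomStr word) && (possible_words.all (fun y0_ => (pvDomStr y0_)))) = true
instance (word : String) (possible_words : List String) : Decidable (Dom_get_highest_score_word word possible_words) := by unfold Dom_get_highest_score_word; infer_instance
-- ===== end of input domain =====

-- B replaces A's score-dict + separate max() and filter passes by a single pass keeping the
-- running best score and its words (dedup via a seen set), the score as one sum comprehension;
-- objective: simpler one-pass decomposition, no speed claim.

-- ===== PORT A =====
-- inner score loop of A; word[i] / possible_word[i] ported with pyGetD, exact since
-- Pre_ guarantees every index i < len(word) ≤ len(possible_word) is in range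
def pvScoreA (w pw : List Char) : Int :=
  (PySem.List.pyRange 0 (w.length : Int) 1).foldl (fun score i =>
    let score := if PySem.List.pyGetD w i ' ' == PySem.List.pyGetD pw i ' ' then score + 1 else score
    if (decide (i > 0) && (PySem.List.pyGetD w (i-1) ' ' == PySem.List.pyGetD w i ' ')
        && (PySem.List.pyGetD pw (i-1) ' ' == PySem.List.pyGetD pw i ' ')) then score + 1 else score) 0

-- scores = the dict built by A's outer loop
def pvScores (word : String) (possible_words : List String) : PySem.Dict String Int :=
  possible_words.foldl (fun d pw => d.insert pw (pvScoreA word.toList pw.toList)) PySem.Dict.empty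

def get_highest_score_word (word : String) (possible_words : List String) : List String :=
  match PySem.List.max? (pvScores word possible_words).values (fun x => x) with
  | none => []            -- max([]) raises ValueError in Python: excluded by Pre_
  | some max_score =>
    (pvScores word possible_words).keys.filter
      (fun key => (pvScores word possible_words).getD key 0 == max_score)

-- ===== PORT B =====
-- B's score: one sum comprehension adding both boolean tests per index
def pvScoreB (w pw : List Char) : Int :=
  ((PySem.List.pyRange 0 (w.length : Int) 1).map (fun i =>
    (if PySem.List.pyGetD w i ' ' == PySem.List.pyGetD pw i ' ' then (1:Int) else 0)
    + (if (decide (i > 0) && (PySem.List.pyGetD w (i-1) ' ' == PySem.List.pyGetD w i ' ')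
           && (PySem.List.pyGetD pw (i-1) ' ' == PySem.List.pyGetD pw i ' ')) then (1:Int) else 0))).sum

-- the one-pass loop of B: running best score, list of best words, seen set
def pvGo (word : String) : List String → Option Int → List String → PySem.Set String → List String
  | [], _, best_words, _ => best_words
  | pw :: rest, best_score, best_words, seen =>
    if PySem.Set.contains seen pw then pvGo word rest best_score best_words seen
    else
      let s := pvScoreB word.toList pw.toList
      let seen' := PySem.Set.add seen pw
      match best_score with
      | none => pvGo word rest (some s) [pw] seen'
      | some b =>
        if s > b then pvGo word rest (some s) [pw] seen'
        else if s == b then pvGo word rest (some b) (best_words ++ [pw]) seen'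
        else pvGo word rest (some b) best_words seen'

def get_highest_score_word_alt (word : String) (possible_words : List String) : List String :=
  pvGo word possible_words none [] PySem.Set.empty

-- ===== PRECONDITION & SPEC =====
-- Pre_ excludes exactly the inputs where A raises: ValueError on an empty possible_words
-- (max of an empty list) and IndexError when some possible word is shorter than word.
def Pre_get_highest_score_word (word : String) (possible_words : List String) : Prop :=
  possible_words ≠ [] ∧ ∀ pw ∈ possible_words, word.length ≤ pw.length
instance (word : String) (possible_words : List String) : Decidable (Pre_get_highest_score_word word possible_words) := by unfold Pre_get_highest_score_word; infer_instance

def pvWitness_get_highest_score_word : String × List String := ("ab", ["abc", "bb", "ab"])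

def Spec_get_highest_score_word (word : String) (possible_words : List String) (out : List String) : Prop := out = get_highest_score_word_alt word possible_words
instance (word : String) (possible_words : List String) (out : List String) : Decidable (Spec_get_highest_score_word word possible_words out) := by unfold Spec_get_highest_score_word; infer_instance

-- ===== CLAIM (what is proved, stated in full; the proofs are below) =====
def Claim_equal_get_highest_score_word : Prop := ∀ (word : String) (possible_words : List String), Dom_get_highest_score_word word possible_words → Pre_get_highest_score_word word possible_words → Spec_get_highest_score_word word possible_words (get_highest_score_word word possible_words)

-- ===== LEMMAS AND PROOFS =====

-- the common reference value: best-scoring entries of the deduplicated list under score g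
def pvResult (g : String → Int) (M : List String) : List String :=
  match PySem.List.max? (M.map g) (fun x => x) with
  | none => []
  | some m => M.filter (fun k => g k == m)

-- generic: a fold adding 1 for each of two boolean tests counts both tests
theorem pv_foldl_two_ifs (c1 c2 : Int → Bool) (l : List Int) (a : Int) :
    l.foldl (fun s i => if c2 i then (if c1 i then s + 1 else s) + 1
                        else (if c1 i then s + 1 else s)) a
      = a + (l.countP c1 : Int) + (l.countP c2 : Int) := by
  induction l generalizing a with
  | nil => simp
  | cons x t ih =>
    simp only [List.foldl_cons, List.countP_cons, ih]
    split_ifs <;> push_cast <;> ring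

theorem pv_max?_eq (xs : List Int) (b : Int) (hmem : b ∈ xs) (hub : ∀ y ∈ xs, y ≤ b) :
    PySem.List.max? xs (fun x => x) = some b := by
  cases hm : PySem.List.max? xs (fun x => x) with
  | none =>
    rw [PySem.List.max?_eq_none_iff] at hm
    subst hm; cases hmem
  | some m =>
    have h1 : m ∈ xs := PySem.List.max?_mem hm
    have h2 := PySem.List.max?_isMax hm b hmem
    have h3 := hub m h1
    have h2' : b ≤ m := h2
    simp only [Option.some.injEq]
    omega

theorem pvScore_eq (w pw : List Char) : pvScoreA w pw = pvScoreB w pw := by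
  unfold pvScoreA pvScoreB
  rw [pv_foldl_two_ifs (fun i => PySem.List.pyGetD w i ' ' == PySem.List.pyGetD pw i ' ')
        (fun i => decide (i > 0) && (PySem.List.pyGetD w (i-1) ' ' == PySem.List.pyGetD w i ' ')
          && (PySem.List.pyGetD pw (i-1) ' ' == PySem.List.pyGetD pw i ' '))]
  rw [PySem.List.sum_map_add_int, PySem.List.sum_map_ite_one_zero, PySem.List.sum_map_ite_one_zero]
  ring

theorem pv_getD_foldl (l : List String) (f : String → Int) (d : PySem.Dict String Int) (k : String) :
    (l.foldl (fun d pw => d.insert pw (f pw)) d).getD k 0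
      = if k ∈ l then f k else d.getD k 0 := by
  induction l generalizing d with
  | nil => simp
  | cons x r ih =>
    simp only [List.foldl_cons, ih, PySem.Dict.getD_insert]
    by_cases hk : k ∈ r
    · simp [hk]
    · by_cases hx : k = x <;> simp [hk, hx]

theorem pvA_eq_result (word : String) (possible_words : List String) :
    get_highest_score_word word possible_words
      = pvResult (fun pw => pvScoreA word.toList pw.toList) (PySem.List.dedup possible_words) := by
  unfold get_highest_score_word pvResult
  have hkeys : (pvScores word possible_words).keys = PySem.List.dedup possible_words := by
    unfold pvScores
    rw [PySem.Dict.keys_foldl_insert]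
    simp [PySem.Dict.keys_empty, PySem.Set.update_nil_left]
  have hnodup : (pvScores word possible_words).keys.Nodup := by
    rw [hkeys]; exact PySem.List.nodup_dedup _
  have hvals : (pvScores word possible_words).values
      = (PySem.List.dedup possible_words).map (fun k => pvScoreA word.toList k.toList) := by
    rw [PySem.Dict.values_eq_map_keys _ hnodup 0, hkeys]
    apply List.map_congr_left
    intro k hk
    unfold pvScores
    rw [pv_getD_foldl]
    simp [(PySem.List.mem_dedup _ _).1 hk]
  rw [hvals]
  cases hm : PySem.List.max? ((PySem.List.dedup possible_words).map
      (fun k => pvScoreA word.toList k.toList)) (fun x => x) with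
  | none => rfl
  | some m =>
    simp only []
    rw [hkeys]
    apply List.filter_congr
    intro k hk
    unfold pvScores
    rw [pv_getD_foldl]
    simp [(PySem.List.mem_dedup _ _).1 hk]

theorem pvGo_inv (word : String) (rest : List String) :
    ∀ (L : List String) (b : Int), L.Nodup →
      (∀ y ∈ L, pvScoreB word.toList y.toList ≤ b) →
      b ∈ L.map (fun y => pvScoreB word.toList y.toList) →
      pvGo word rest (some b) (L.filter (fun k => pvScoreB word.toList k.toList == b)) L
        = pvResult (fun pw => pvScoreB word.toList pw.toList) (rest.foldl PySem.Set.add L) := by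
  induction rest with
  | nil =>
    intro L b hnd hub hmem
    simp only [pvGo, List.foldl_nil, pvResult]
    rw [pv_max?_eq _ b hmem]
    intro y hy
    obtain ⟨x, hx, rfl⟩ := List.mem_map.1 hy
    exact hub x hx
  | cons pw r ih =>
    intro L b hnd hub hmem
    simp only [pvGo, List.foldl_cons]
    by_cases hin : pw ∈ L
    · rw [if_pos ((PySem.Set.contains_iff _ _).2 hin), PySem.Set.add_of_mem hin]
      exact ih L b hnd hub hmem
    · rw [if_neg (by simp [hin]), PySem.Set.add_of_not_mem hin]
      have hnd' : (L ++ [pw]).Nodup := by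
        rw [List.nodup_append]
        exact ⟨hnd, List.nodup_singleton _, by
          intro a ha c hc
          simp at hc; subst hc
          exact fun he => hin (he ▸ ha)⟩
      by_cases hgt : pvScoreB word.toList pw.toList > b
      · rw [if_pos hgt]
        have hfil : [pw] = (L ++ [pw]).filter
            (fun k => pvScoreB word.toList k.toList == pvScoreB word.toList pw.toList) := by
          rw [List.filter_append]
          have h0 : L.filter (fun k => pvScoreB word.toList k.toList == pvScoreB word.toList pw.toList) = [] := by
            apply List.filter_eq_nil_iff.2
            intro y hy
            have := hub y hy
            simp only [beq_iff_eq]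
            omega
          simp [h0]
        have hres := ih (L ++ [pw]) (pvScoreB word.toList pw.toList) hnd'
          (by
            intro y hy
            rcases List.mem_append.1 hy with h | h
            · have := hub y h; omega
            · simp at h; subst h; omega)
          (List.mem_map.2 ⟨pw, by simp⟩)
        rw [← hfil] at hres
        exact hres
      · rw [if_neg hgt]
        by_cases heq : pvScoreB word.toList pw.toList = b
        · rw [if_pos (by simp [heq])]
          have hfil : L.filter (fun k => pvScoreB word.toList k.toList == b) ++ [pw]
              = (L ++ [pw]).filter (fun k => pvScoreB word.toList k.toList == b) := by
            rw [List.filter_append]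
            simp [heq]
          have hres := ih (L ++ [pw]) b hnd'
            (by
              intro y hy
              rcases List.mem_append.1 hy with h | h
              · exact hub y h
              · simp at h; subst h; omega)
            (by
              rcases List.mem_map.1 hmem with ⟨x, hx, hxe⟩
              exact List.mem_map.2 ⟨x, by simp [hx], hxe⟩)
          rw [← hfil] at hres
          exact hres
        · rw [if_neg (by simp [heq])]
          have hfil : L.filter (fun k => pvScoreB word.toList k.toList == b)
              = (L ++ [pw]).filter (fun k => pvScoreB word.toList k.toList == b) := by
            rw [List.filter_append]
            simp [heq]
          have hres := ih (L ++ [pw]) b hnd'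
            (by
              intro y hy
              rcases List.mem_append.1 hy with h | h
              · exact hub y h
              · simp at h; subst h; omega)
            (by
              rcases List.mem_map.1 hmem with ⟨x, hx, hxe⟩
              exact List.mem_map.2 ⟨x, by simp [hx], hxe⟩)
          rw [← hfil] at hres
          exact hres

theorem pvB_eq_result (word : String) (possible_words : List String) (h : possible_words ≠ []) :
    get_highest_score_word_alt word possible_words
      = pvResult (fun pw => pvScoreB word.toList pw.toList) (PySem.List.dedup possible_words) := by
  cases possible_words with
  | nil => exact absurd rfl h
  | cons pw rest =>
    unfold get_highest_score_word_alt
    simp only [pvGo]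
    rw [if_neg (by simp [PySem.Set.empty])]
    have hadd : PySem.Set.add PySem.Set.empty pw = [pw] :=
      PySem.Set.add_of_not_mem (by simp [PySem.Set.empty])
    rw [hadd]
    have hfil : [pw] = List.filter
        (fun k => pvScoreB word.toList k.toList == pvScoreB word.toList pw.toList) [pw] := by
      simp
    have hres := pvGo_inv word rest [pw] (pvScoreB word.toList pw.toList) (by simp)
      (by intro y hy; simp at hy; subst hy; omega) (by simp)
    rw [← hfil] at hres
    have hdd : PySem.List.dedup (pw :: rest) = rest.foldl PySem.Set.add [pw] := by
      rw [PySem.List.dedup_eq_ofList, PySem.Set.ofList_eq_foldl, List.foldl_cons]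
      have : PySem.Set.add ([] : PySem.Set String) pw = [pw] := hadd
      rw [this]
    rw [hdd]
    exact hres

-- ===== VERDICT (by name: the statement is the Claim_ definition above) =====
theorem get_highest_score_word_spec : Claim_equal_get_highest_score_word := by
  intro word possible_words _ hpre
  obtain ⟨hne, -⟩ := hpre
  unfold Spec_get_highest_score_word
  rw [pvA_eq_result, pvB_eq_result word possible_words hne]
  unfold pvResult
  have hmap : (PySem.List.dedup possible_words).map (fun pw => pvScoreA word.toList pw.toList)
      = (PySem.List.dedup possible_words).map (fun pw => pvScoreB word.toList pw.toList) := by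
    apply List.map_congr_left
    intro x hx
    exact pvScore_eq _ _
  rw [hmap]
  cases hm : PySem.List.max? ((PySem.List.dedup possible_words).map (fun pw => pvScoreB word.toList pw.toList)) (fun x => x) with
  | none => rfl
  | some m =>
    apply List.filter_congr
    intro x hx
    congr 1
    exact pvScore_eq _ _
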